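-- pv_equiv track=rewrite | github.com/Lin-Silver/Reverie-Cli | reverie/harness.py | _limited_names
-- ===== SOURCE A (Python) =====
-- from typing import Any, Dict, Iterable, List, Optional
--
-- def _limited_names(names: Iterable[Any], limit: int = 6) -> List[str]:
--     visible: List[str] = []
--     seen: set[str] = set()
--     for item in names:
--         text = str(item or "").strip()
--         if not text or text in seen:
--             continue
--         visible.append(text)
--         seen.add(text)
--         if len(visible) >= limit:
--             break
--     return visible
-- ===== SOURCE B (Python) =====
-- def _limited_names(names, limit=6):
--     def go(xs, k):
--         if not xs or k <= 0:
--             return []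
--         t = xs[0]
--         return [t] + go([x for x in xs[1:] if x != t], k - 1)
--     return go([t for t in (str(item or "").strip() for item in names) if t], limit)
-- ===== Notes on version B (the rewrite author's own statement) =====
-- stated objective: alternative
-- what changed: Replaces the single forward scan with a mutable seen-set and early break by a staged sieve with no seen structure at all: strip and drop empties in one pass, then recursively take the first name, filter all its remaining duplicates out of the tail, and recurse with a decremented budget (at most `limit` filter passes).
-- intended difference: When limit <= 0 and the input contains a non-empty stripped name, A's post-append length check still returns the first unique non-empty name, while B returns an empty list honouring the requested bound; B's value is the intended one. — e.g. on _limited_names(["a"], 0): A returns ["a"], B returns []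
import Mathlib
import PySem

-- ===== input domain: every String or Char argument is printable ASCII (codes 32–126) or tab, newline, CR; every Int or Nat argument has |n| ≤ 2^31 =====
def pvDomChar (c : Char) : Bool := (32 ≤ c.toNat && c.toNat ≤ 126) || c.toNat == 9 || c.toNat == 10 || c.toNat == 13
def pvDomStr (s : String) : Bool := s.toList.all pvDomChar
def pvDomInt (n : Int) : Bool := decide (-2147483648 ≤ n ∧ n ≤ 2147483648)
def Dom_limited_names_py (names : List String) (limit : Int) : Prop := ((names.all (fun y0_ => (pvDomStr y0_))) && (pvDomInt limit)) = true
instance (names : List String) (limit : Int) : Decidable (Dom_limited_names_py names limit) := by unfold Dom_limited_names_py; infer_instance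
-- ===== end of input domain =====

-- B replaces A's seen-set scan with an early break by a recursive sieve: strip once, then repeatedly take the first non-empty name, filter its duplicates out of the tail, recurse with a decremented budget (objective: alternative); for limit ≤ 0 with a non-empty name B returns an empty list where A still returns one name (see D_).

-- ===== PORT A =====
-- loop of A: for item in names, with visible/seen accumulators and the `break` when len(visible) >= limit
def limitedNamesLoopA (xs : List String) (limit : Int) (visible : List String)
    (seen : PySem.Set String) : List String :=
  match xs with
  | [] => visible
  | item :: rest =>
    -- text = str(item or "").strip(): for a string argument, `item or ""` is item itself
    let text := PySem.Str.strip item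
    if text = "" ∨ PySem.Set.contains seen text then
      limitedNamesLoopA rest limit visible seen
    else
      let visible' := visible ++ [text]
      let seen' := PySem.Set.add seen text
      if limit ≤ (visible'.length : Int) then visible'
      else limitedNamesLoopA rest limit visible' seen'

def limited_names_py (names : List String) (limit : Int) : List String :=
  limitedNamesLoopA names limit [] PySem.Set.empty

-- ===== PORT B =====
-- go(xs, k) of Source B: on the pre-filtered non-empty stripped names, keep the head t and sieve its
-- duplicates out of the tail; the Nat fuel (initialised to the list length, which filtering never
-- exceeds) is only termination bookkeeping making the recursion structural
def limitedGoB : Nat → List String → Int → List String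
  | _, [], _ => []
  | 0, _ :: _, _ => []  -- unreachable: fuel starts at the list length and filtering only shrinks it
  | fuel + 1, t :: rest, k =>
    if k ≤ 0 then []
    else t :: limitedGoB fuel (rest.filter (fun x => !(x == t))) (k - 1)

def limited_names_py_alt (names : List String) (limit : Int) : List String :=
  limitedGoB names.length
    ((names.map PySem.Str.strip).filter (fun t => !(t == ""))) limit

-- ===== PRECONDITION & SPEC =====
-- When limit ≤ 0 and some stripped name is non-empty, A's post-append check still returns the first unique non-empty name; B returns an empty list, which honours the requested bound and is the intended value.
def D_limited_names_py (names : List String) (limit : Int) : Prop :=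
  limit ≤ 0 ∧ ∃ s ∈ names, PySem.Str.strip s ≠ ""
instance (names : List String) (limit : Int) : Decidable (D_limited_names_py names limit) := by
  unfold D_limited_names_py; infer_instance

def Spec_limited_names_py (names : List String) (limit : Int) (out : List String) : Prop :=
  ¬ D_limited_names_py names limit → out = limited_names_py_alt names limit
instance (names : List String) (limit : Int) (out : List String) : Decidable (Spec_limited_names_py names limit out) := by
  unfold Spec_limited_names_py; infer_instance

def pvDiffWitness_limited_names_py : List String × Int := (["a"], 0)
def pvDiffWitnessOut_limited_names_py : (List String) × (List String) := (["a"], [])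

-- ===== CLAIM (what is proved, stated in full; the proofs are below) =====
def Claim_unchanged_limited_names_py : Prop := ∀ (names : List String) (limit : Int), Dom_limited_names_py names limit → Spec_limited_names_py names limit (limited_names_py names limit)
def Claim_changed_limited_names_py : Prop := Dom_limited_names_py (pvDiffWitness_limited_names_py.1) (pvDiffWitness_limited_names_py.2) ∧ D_limited_names_py (pvDiffWitness_limited_names_py.1) (pvDiffWitness_limited_names_py.2) ∧ limited_names_py (pvDiffWitness_limited_names_py.1) (pvDiffWitness_limited_names_py.2) = pvDiffWitnessOut_limited_names_py.1 ∧ limited_names_py_alt (pvDiffWitness_limited_names_py.1) (pvDiffWitness_limited_names_py.2) = pvDiffWitnessOut_limited_names_py.2 ∧ pvDiffWitnessOut_limited_names_py.1 ≠ pvDiffWitnessOut_limited_names_py.2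

-- ===== LEMMAS AND PROOFS =====

-- proof-side stateful dedup: the non-empty, not-yet-seen stripped names of xs, in order
def dedNew (seen : PySem.Set String) : List String → List String
  | [] => []
  | x :: xs =>
    let t := PySem.Str.strip x
    if t = "" ∨ PySem.Set.contains seen t then dedNew seen xs
    else t :: dedNew (PySem.Set.add seen t) xs

-- proof-side sieve dedup (limitedGoB without the budget; same fuel)
def nnSieve : Nat → List String → List String
  | _, [] => []
  | 0, _ :: _ => []
  | fuel + 1, t :: rest => t :: nnSieve fuel (rest.filter (fun x => !(x == t)))

theorem loopA_eq_take (xs : List String) (limit : Int) :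
    ∀ (visible : List String) (seen : PySem.Set String),
    (visible.length : Int) < limit →
    limitedNamesLoopA xs limit visible seen
      = visible ++ (dedNew seen xs).take (limit - visible.length).toNat := by
  induction xs with
  | nil => intro visible seen _; simp [limitedNamesLoopA, dedNew]
  | cons x xs ih =>
    intro visible seen hlt
    simp only [limitedNamesLoopA, dedNew]
    by_cases hskip : PySem.Str.strip x = "" ∨ PySem.Set.contains seen (PySem.Str.strip x)
    · simp only [hskip, if_true]; exact ih visible seen hlt
    · simp only [hskip, if_false]
      by_cases hstop : limit ≤ ((visible ++ [PySem.Str.strip x]).length : Int)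
      · simp only [hstop, if_true]
        have hk : (limit - (visible.length : Int)).toNat = 1 := by
          simp at hstop; omega
        rw [hk]; simp
      · simp only [hstop, if_false]
        rw [ih (visible ++ [PySem.Str.strip x]) (PySem.Set.add seen (PySem.Str.strip x))
            (by simp at hstop ⊢; omega)]
        have hk : (limit - (visible.length : Int)).toNat
            = ((limit - ((visible ++ [PySem.Str.strip x]).length : Int)).toNat) + 1 := by
          simp at hstop ⊢; omega
        rw [hk]; simp

theorem goB_eq_take (fuel : Nat) :
    ∀ (xs : List String) (k : Int),
    limitedGoB fuel xs k = (nnSieve fuel xs).take k.toNat := by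
  induction fuel with
  | zero =>
    intro xs k
    cases xs <;> simp only [limitedGoB, nnSieve, List.take_nil]
  | succ fuel ih =>
    intro xs k
    match xs with
    | [] => simp only [limitedGoB, nnSieve, List.take_nil]
    | t :: rest =>
      simp only [limitedGoB, nnSieve]
      by_cases hk : k ≤ 0
      · have h0 : k.toNat = 0 := by omega
        rw [if_pos hk, h0, List.take_zero]
      · rw [if_neg hk, ih (rest.filter (fun x => !(x == t))) (k - 1)]
        have h1 : k.toNat = (k - 1).toNat + 1 := by omega
        rw [h1, List.take_succ_cons]

theorem dedNew_eq_nnSieve (names : List String) :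
    ∀ (fuel : Nat) (seen : PySem.Set String),
    ((names.map PySem.Str.strip).filter
        (fun t => !(t == "") && !(PySem.Set.contains seen t))).length ≤ fuel →
    dedNew seen names
      = nnSieve fuel ((names.map PySem.Str.strip).filter
          (fun t => !(t == "") && !(PySem.Set.contains seen t))) := by
  induction names with
  | nil => intro fuel seen _; cases fuel <;> simp [dedNew, nnSieve]
  | cons x xs ih =>
    intro fuel seen hf
    simp only [dedNew, List.map_cons, List.filter_cons] at hf ⊢
    by_cases ht : PySem.Str.strip x = ""
    · -- empty: dedNew skips it and the filter drops it
      have hcond : ¬((!(PySem.Str.strip x == "") && !(PySem.Set.contains seen (PySem.Str.strip x))) = true) := by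
        simp [ht]
      rw [if_neg hcond] at hf ⊢
      rw [if_pos (Or.inl ht)]
      exact ih fuel seen hf
    · by_cases hc : PySem.Set.contains seen (PySem.Str.strip x) = true
      · -- seen: head filtered out, dedNew skips it
        have hmem : PySem.Str.strip x ∈ seen := List.mem_of_elem_eq_true hc
        have hcond : ¬((!(PySem.Str.strip x == "") && !(PySem.Set.contains seen (PySem.Str.strip x))) = true) := by
          simp [hmem]
        rw [if_neg hcond] at hf ⊢
        rw [if_pos (Or.inr hc)]
        exact ih fuel seen hf
      · -- not seen and non-empty: the head survives the filter
        have hnmem : PySem.Str.strip x ∉ seen := by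
          intro hm
          exact hc (by simpa [PySem.Set.contains] using hm)
        have hcond : (!(PySem.Str.strip x == "") && !(PySem.Set.contains seen (PySem.Str.strip x))) = true := by
          simp [ht, PySem.Set.contains, hnmem]
        rw [if_pos hcond] at hf ⊢
        rw [if_neg (by simp [ht, PySem.Set.contains, hnmem] :
          ¬(PySem.Str.strip x = "" ∨ PySem.Set.contains seen (PySem.Str.strip x) = true))]
        match fuel with
        | 0 => exact absurd hf (by simp)
        | f + 1 =>
          simp only [nnSieve]
          have hadd : PySem.Set.add seen (PySem.Str.strip x) = seen ++ [PySem.Str.strip x] := by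
            simp only [PySem.Set.add]
            rw [if_neg (by simpa [PySem.Set.contains] using hnmem)]
          congr 1
          have hfil : ((xs.map PySem.Str.strip).filter
                (fun t => !(t == "") && !(PySem.Set.contains seen t))).filter
                  (fun y => !(y == PySem.Str.strip x))
              = (xs.map PySem.Str.strip).filter
                (fun t => !(t == "") && !(PySem.Set.contains
                    (PySem.Set.add seen (PySem.Str.strip x)) t)) := by
            rw [List.filter_filter]
            apply List.filter_congr
            intro u _
            simp only [hadd, PySem.Set.contains, List.contains_append, List.contains_cons,
              List.contains_nil, Bool.or_false, Bool.not_or]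
            cases u == PySem.Str.strip x <;> cases u == "" <;> cases List.contains seen u <;> rfl
          rw [hfil]
          apply ih f (PySem.Set.add seen (PySem.Str.strip x))
          rw [← hfil]
          exact le_trans (List.length_filter_le _ _) (by simpa using hf)

theorem loopA_of_all_empty (xs : List String) (limit : Int) (visible : List String)
    (seen : PySem.Set String) (h : ∀ s ∈ xs, PySem.Str.strip s = "") :
    limitedNamesLoopA xs limit visible seen = visible := by
  induction xs generalizing seen with
  | nil => simp [limitedNamesLoopA]
  | cons x xs ih =>
    simp only [limitedNamesLoopA, h x (by simp), true_or, if_true]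
    exact ih _ (fun s hs => h s (by simp [hs]))

theorem alt_eq_take_dedNew (names : List String) (limit : Int) :
    limited_names_py_alt names limit
      = (dedNew PySem.Set.empty names).take limit.toNat := by
  unfold limited_names_py_alt
  rw [goB_eq_take]
  have hid : (names.map PySem.Str.strip).filter
      (fun t => !(t == "") && !(PySem.Set.contains PySem.Set.empty t))
      = (names.map PySem.Str.strip).filter (fun t => !(t == "")) := by
    apply List.filter_congr
    intro u _
    simp [PySem.Set.empty, PySem.Set.contains]
  rw [dedNew_eq_nnSieve names names.length PySem.Set.empty
      (by rw [hid]; exact le_trans (List.length_filter_le _ _) (by simp)), hid]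

-- ===== VERDICT (by name: the statement is the Claim_ definition above) =====
theorem limited_names_py_spec : Claim_unchanged_limited_names_py := by
  intro names limit _ hnd
  unfold D_limited_names_py at hnd
  push Not at hnd
  rw [alt_eq_take_dedNew]
  by_cases hlim : 0 < limit
  · unfold limited_names_py
    rw [loopA_eq_take names limit [] PySem.Set.empty (by simpa using hlim)]
    simp
  · have hall : ∀ s ∈ names, PySem.Str.strip s = "" := by
      intro s hs
      by_contra hne
      exact hne (hnd (by omega) s hs)
    have h0 : limit.toNat = 0 := by omega
    unfold limited_names_py
    rw [loopA_of_all_empty names limit [] PySem.Set.empty hall, h0]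
    simp

theorem limited_names_py_changed : Claim_changed_limited_names_py := by
  unfold Claim_changed_limited_names_py; decide
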